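-- pv_equiv track=rewrite | github.com/honu-shell-utions/python | sandbox/xx_project_euler/701-750/730_shifted_pythag_triples02.py | nsols
-- ===== SOURCE A (Python) =====
-- def nsols(a,b,c,P):
--    """ number of solutions with starting triple (a,b,c) and a+b+c<=P """
--    if a+b+c>P: return 0
--    S = 1 if a>0 else 0
--    S += nsols(-2*a+b+2*c,-a+2*b+2*c,-2*a+2*b+3*c,P);
--    if a>0:
--       S += nsols(2*a+b+2*c,a+2*b+2*c,2*a+2*b+3*c,P);
--    if (a==0 and b>0 and b<c) or (a>0 and b>a):
--       S += nsols(a-2*b+2*c,2*a-b+2*c,2*a-2*b+3*c,P);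
--    return S
-- ===== SOURCE B (Python) =====
-- def nsols(a, b, c, P):
--     """ number of solutions with starting triple (a,b,c) and a+b+c<=P """
--     count = 0
--     level = [(a, b, c)]
--     while level:
--         nxt = []
--         for (a, b, c) in level:
--             if a + b + c > P:
--                 continue
--             if a > 0:
--                 count += 1
--             nxt.append((-2*a + b + 2*c, -a + 2*b + 2*c, -2*a + 2*b + 3*c))
--             if a > 0:
--                 nxt.append((2*a + b + 2*c, a + 2*b + 2*c, 2*a + 2*b + 3*c))
--             if (a == 0 and 0 < b < c) or (a > 0 and b > a):
--                 nxt.append((a - 2*b + 2*c, 2*a - b + 2*c, 2*a - 2*b + 3*c))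
--         level = nxt
--     return count
-- ===== Notes on version B (the rewrite author's own statement) =====
-- stated objective: alternative
-- what changed: The ternary-tree recursion is replaced by an explicit worklist/stack traversal with a running counter; since each node contributes independently, traversal order does not affect the total.
-- outside the precondition, e.g. on nsols(0, 2, 1, 100): A returns 5, B returns 5
import Mathlib
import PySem

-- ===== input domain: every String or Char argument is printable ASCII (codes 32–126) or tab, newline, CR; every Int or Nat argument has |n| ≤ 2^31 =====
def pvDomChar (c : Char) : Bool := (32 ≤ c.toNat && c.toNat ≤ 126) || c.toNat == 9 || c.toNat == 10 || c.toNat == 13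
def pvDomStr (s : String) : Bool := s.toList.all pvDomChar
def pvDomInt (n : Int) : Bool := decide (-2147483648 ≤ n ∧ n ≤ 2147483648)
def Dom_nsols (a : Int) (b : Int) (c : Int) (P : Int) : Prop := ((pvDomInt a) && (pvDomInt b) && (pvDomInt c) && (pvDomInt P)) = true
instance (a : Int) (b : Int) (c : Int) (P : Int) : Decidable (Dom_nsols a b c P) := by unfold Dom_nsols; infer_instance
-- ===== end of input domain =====

-- B replaces the ternary-tree recursion by an iterative breadth-first level traversal with a
-- running counter (an alternative decomposition; node order does not affect the total).


-- ===== PORT A =====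
-- Literal transliteration of A's recursion.  The Nat fuel is a TOTALITY GUARD only
-- (Python's recursion is unbounded outside the invariant region admitted by Pre_nsols);
-- on Pre_nsols the fuel (P - (a+b+c) + 1).toNat suffices because each recursive call
-- strictly increases a + b + c (nsolsGo_congr below makes the fuel irrelevance precise).
def nsolsGo : Nat → Int → Int → Int → Int → Int
  | 0, _, _, _, _ => 0
  | Nat.succ n, a, b, c, P =>
    if a + b + c > P then 0
    else
      (if a > 0 then 1 else 0)
      + nsolsGo n (-2*a + b + 2*c) (-a + 2*b + 2*c) (-2*a + 2*b + 3*c) P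
      + (if a > 0 then nsolsGo n (2*a + b + 2*c) (a + 2*b + 2*c) (2*a + 2*b + 3*c) P else 0)
      + (if (a = 0 ∧ 0 < b ∧ b < c) ∨ (a > 0 ∧ b > a) then
           nsolsGo n (a - 2*b + 2*c) (2*a - b + 2*c) (2*a - 2*b + 3*c) P else 0)

def nsols (a : Int) (b : Int) (c : Int) (P : Int) : Int :=
  nsolsGo ((P - (a + b + c) + 1).toNat) a b c P

-- ===== PORT B =====
-- One element of B's inner `for` body: children appended to `nxt` (in B's append order) …
def pvChildren (P : Int) (t : Int × Int × Int) : List (Int × Int × Int) :=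
  match t with
  | (a, b, c) =>
    if a + b + c > P then []
    else
      [(-2*a + b + 2*c, -a + 2*b + 2*c, -2*a + 2*b + 3*c)]
      ++ (if a > 0 then [(2*a + b + 2*c, a + 2*b + 2*c, 2*a + 2*b + 3*c)] else [])
      ++ (if (a = 0 ∧ 0 < b ∧ b < c) ∨ (a > 0 ∧ b > a) then
            [(a - 2*b + 2*c, 2*a - b + 2*c, 2*a - 2*b + 3*c)] else [])

-- … and the contribution to `count`
def pvScore (P : Int) (t : Int × Int × Int) : Int :=
  match t with
  | (a, b, c) => if a + b + c > P then 0 else if a > 0 then 1 else 0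

-- B's inner `for (a,b,c) in level` loop: state = (nxt, count)
def pvStep (P : Int) (s : List (Int × Int × Int) × Int) (t : Int × Int × Int) :
    List (Int × Int × Int) × Int :=
  (s.1 ++ pvChildren P t, s.2 + pvScore P t)

-- B's outer `while level:` loop; the Nat fuel is a TOTALITY GUARD only (see port A):
-- on Pre_nsols every level is one generation deeper, so (P - (a+b+c) + 1).toNat
-- iterations are enough before the level empties.
def nsolsLevelGo (P : Int) : Nat → List (Int × Int × Int) → Int → Int
  | _, [], cnt => cnt
  | 0, _ :: _, cnt => cnt
  | Nat.succ n, level, cnt =>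
      let r := level.foldl (pvStep P) ([], cnt)
      nsolsLevelGo P n r.1 r.2

def nsols_alt (a : Int) (b : Int) (c : Int) (P : Int) : Int :=
  nsolsLevelGo P ((P - (a + b + c) + 1).toNat) [(a, b, c)] 0

-- ===== PRECONDITION & SPEC =====
-- Pre_ admits every input that returns immediately (a+b+c > P) and the invariant region
-- 0 ≤ a ≤ b ≤ c, 1 ≤ c, which is preserved by all three child transforms with strictly
-- growing sum, so A's recursion terminates there.  Outside it A's recursion is unbounded
-- on most inputs (Python RecursionError); this excludes a fringe of non-invariant inputs
-- on which A happens to return after drifting into the invariant region (e.g.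
-- (0,2,1,100)) — there B returns the same value, but the ports' fuel is sized by the
-- invariant argument and nothing is claimed.
def Pre_nsols (a : Int) (b : Int) (c : Int) (P : Int) : Prop :=
  a + b + c > P ∨ (0 ≤ a ∧ a ≤ b ∧ b ≤ c ∧ 1 ≤ c)
instance (a : Int) (b : Int) (c : Int) (P : Int) : Decidable (Pre_nsols a b c P) := by
  unfold Pre_nsols; infer_instance

def pvWitness_nsols : Int × Int × Int × Int := (0, 1, 1, 100)

def Spec_nsols (a : Int) (b : Int) (c : Int) (P : Int) (out : Int) : Prop := out = nsols_alt a b c P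
instance (a : Int) (b : Int) (c : Int) (P : Int) (out : Int) : Decidable (Spec_nsols a b c P out) := by
  unfold Spec_nsols; infer_instance

-- ===== CLAIM (what is proved, stated in full; the proofs are below) =====
def Claim_equal_nsols : Prop := ∀ (a : Int) (b : Int) (c : Int) (P : Int),
  Dom_nsols a b c P → Pre_nsols a b c P → Spec_nsols a b c P (nsols a b c P)

-- ===== LEMMAS AND PROOFS =====

-- the invariant region, the node sum and the node value with its canonical fuel (proof-side only)
def pvInv (t : Int × Int × Int) : Prop :=
  match t with
  | (a, b, c) => 0 ≤ a ∧ a ≤ b ∧ b ≤ c ∧ 1 ≤ c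

def pvSum (t : Int × Int × Int) : Int :=
  match t with
  | (a, b, c) => a + b + c

def pvVal (P : Int) (t : Int × Int × Int) : Int :=
  match t with
  | (a, b, c) => nsolsGo ((P - (a + b + c) + 1).toNat) a b c P

-- on the invariant region any two sufficient fuels give the same value
theorem nsolsGo_congr : ∀ (f f' : Nat) (a b c P : Int),
    (0 ≤ a ∧ a ≤ b ∧ b ≤ c ∧ 1 ≤ c) →
    (P - (a + b + c) + 1).toNat ≤ f → (P - (a + b + c) + 1).toNat ≤ f' →
    nsolsGo f a b c P = nsolsGo f' a b c P := by
  intro f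
  induction f with
  | zero =>
    intro f' a b c P hI h h'
    have hgt : a + b + c > P := by omega
    cases f' with
    | zero => rfl
    | succ m => simp [nsolsGo, hgt]
  | succ n ih =>
    intro f' a b c P hI h h'
    cases f' with
    | zero =>
      have hgt : a + b + c > P := by omega
      simp [nsolsGo, hgt]
    | succ m =>
      by_cases hgt : a + b + c > P
      · simp [nsolsGo, hgt]
      · simp only [nsolsGo, if_neg hgt]
        have e1 := ih m (-2*a + b + 2*c) (-a + 2*b + 2*c) (-2*a + 2*b + 3*c) P
          (by omega) (by omega) (by omega)
        have e2 : (if a > 0 then nsolsGo n (2*a + b + 2*c) (a + 2*b + 2*c) (2*a + 2*b + 3*c) P else 0)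
            = (if a > 0 then nsolsGo m (2*a + b + 2*c) (a + 2*b + 2*c) (2*a + 2*b + 3*c) P else 0) := by
          by_cases h2 : a > 0
          · simp only [if_pos h2]
            exact ih m (2*a + b + 2*c) (a + 2*b + 2*c) (2*a + 2*b + 3*c) P
              (by omega) (by omega) (by omega)
          · simp only [if_neg h2]
        have e3 : (if (a = 0 ∧ 0 < b ∧ b < c) ∨ (a > 0 ∧ b > a) then
              nsolsGo n (a - 2*b + 2*c) (2*a - b + 2*c) (2*a - 2*b + 3*c) P else 0)
            = (if (a = 0 ∧ 0 < b ∧ b < c) ∨ (a > 0 ∧ b > a) then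
              nsolsGo m (a - 2*b + 2*c) (2*a - b + 2*c) (2*a - 2*b + 3*c) P else 0) := by
          by_cases h3 : (a = 0 ∧ 0 < b ∧ b < c) ∨ (a > 0 ∧ b > a)
          · simp only [if_pos h3]
            exact ih m (a - 2*b + 2*c) (2*a - b + 2*c) (2*a - 2*b + 3*c) P
              (by omega) (by omega) (by omega)
          · simp only [if_neg h3]
        rw [e1, e2, e3]

-- one node of the level: counter contribution plus its children's values = its own value
theorem pvNode_eq (P a b c : Int) (h : (0 ≤ a ∧ a ≤ b ∧ b ≤ c ∧ 1 ≤ c) ∨ a + b + c > P) :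
    pvScore P (a, b, c) + ((pvChildren P (a, b, c)).map (pvVal P)).sum
      = pvVal P (a, b, c) := by
  by_cases hgt : a + b + c > P
  · have hf : (P - (a + b + c) + 1).toNat = 0 := by omega
    simp [pvScore, pvChildren, pvVal, hgt, hf, nsolsGo]
  · have hI : 0 ≤ a ∧ a ≤ b ∧ b ≤ c ∧ 1 ≤ c := by tauto
    have hf : (P - (a + b + c) + 1).toNat = (P - (a + b + c)).toNat + 1 := by omega
    have e1 : pvVal P (-2*a + b + 2*c, -a + 2*b + 2*c, -2*a + 2*b + 3*c)
        = nsolsGo ((P - (a + b + c)).toNat)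
            (-2*a + b + 2*c) (-a + 2*b + 2*c) (-2*a + 2*b + 3*c) P := by
      simp only [pvVal]
      exact nsolsGo_congr _ _ _ _ _ _ (by omega) (by omega) (by omega)
    have s2 : ((if a > 0 then [(2*a + b + 2*c, a + 2*b + 2*c, 2*a + 2*b + 3*c)]
          else []).map (pvVal P)).sum
        = (if a > 0 then nsolsGo ((P - (a + b + c)).toNat)
            (2*a + b + 2*c) (a + 2*b + 2*c) (2*a + 2*b + 3*c) P else 0) := by
      by_cases h2 : a > 0
      · simp only [if_pos h2, List.map_cons, List.map_nil, List.sum_cons, List.sum_nil,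
          add_zero]
        simp only [pvVal]
        exact nsolsGo_congr _ _ _ _ _ _ (by omega) (by omega) (by omega)
      · simp only [if_neg h2, List.map_nil, List.sum_nil]
    have s3 : ((if (a = 0 ∧ 0 < b ∧ b < c) ∨ (a > 0 ∧ b > a) then
          [(a - 2*b + 2*c, 2*a - b + 2*c, 2*a - 2*b + 3*c)] else []).map (pvVal P)).sum
        = (if (a = 0 ∧ 0 < b ∧ b < c) ∨ (a > 0 ∧ b > a) then
            nsolsGo ((P - (a + b + c)).toNat)
              (a - 2*b + 2*c) (2*a - b + 2*c) (2*a - 2*b + 3*c) P else 0) := by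
      by_cases h3 : (a = 0 ∧ 0 < b ∧ b < c) ∨ (a > 0 ∧ b > a)
      · simp only [if_pos h3, List.map_cons, List.map_nil, List.sum_cons, List.sum_nil,
          add_zero]
        simp only [pvVal]
        exact nsolsGo_congr _ _ _ _ _ _ (by omega) (by omega) (by omega)
      · simp only [if_neg h3, List.map_nil, List.sum_nil]
    simp only [pvVal, pvScore, pvChildren, if_neg hgt]
    rw [hf]
    simp only [nsolsGo, if_neg hgt, List.map_append, List.map_cons, List.map_nil,
      List.sum_append, List.sum_cons, List.sum_nil, add_zero]
    rw [e1, s2, s3]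
    ring

-- B's inner for-loop, characterised
theorem pvFold_eq (P : Int) : ∀ (level : List (Int × Int × Int))
    (acc : List (Int × Int × Int)) (cnt : Int),
    level.foldl (pvStep P) (acc, cnt)
      = (acc ++ level.flatMap (pvChildren P), cnt + (level.map (pvScore P)).sum) := by
  intro level
  induction level with
  | nil => intro acc cnt; simp
  | cons t rest ih =>
    intro acc cnt
    simp only [List.foldl_cons, pvStep, List.flatMap_cons, List.map_cons, List.sum_cons]
    rw [ih]
    simp [List.append_assoc]
    ring

theorem pvLevel_eq (P : Int) : ∀ (f : Nat) (level : List (Int × Int × Int)) (cnt : Int),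
    (∀ t ∈ level, (pvInv t ∨ pvSum t > P) ∧ (P - pvSum t + 1).toNat ≤ f) →
    nsolsLevelGo P f level cnt = cnt + (level.map (pvVal P)).sum := by
  intro f
  induction f with
  | zero =>
    intro level cnt hlev
    have hz : (level.map (pvVal P)).sum = 0 := by
      rw [List.sum_eq_zero]
      intro x hx
      simp only [List.mem_map] at hx
      obtain ⟨t, ht, rfl⟩ := hx
      obtain ⟨a, b, c⟩ := t
      have h2 := (hlev _ ht).2
      simp only [pvSum] at h2
      have hf : (P - (a + b + c) + 1).toNat = 0 := by omega
      simp [pvVal, hf, nsolsGo]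
    cases level with
    | nil => simp [nsolsLevelGo]
    | cons t rest =>
      show cnt = cnt + ((t :: rest).map (pvVal P)).sum
      rw [hz, add_zero]
  | succ n ih =>
    intro level cnt hlev
    cases level with
    | nil => simp [nsolsLevelGo]
    | cons t0 rest =>
      show nsolsLevelGo P n ((t0 :: rest).foldl (pvStep P) ([], cnt)).1
             ((t0 :: rest).foldl (pvStep P) ([], cnt)).2
           = cnt + ((t0 :: rest).map (pvVal P)).sum
      rw [pvFold_eq]
      simp only [List.nil_append]
      rw [ih]
      · -- collapse the sums over the flattened children
        rw [List.map_flatMap, List.flatMap_def, List.sum_flatten, List.map_map,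
          add_assoc, ← PySem.List.sum_map_add_int]
        congr 1
        refine congrArg List.sum (List.map_congr_left ?_)
        intro t ht
        obtain ⟨a, b, c⟩ := t
        simp only [Function.comp_apply]
        exact pvNode_eq P a b c (by simpa [pvInv, pvSum] using (hlev _ ht).1)
      · -- admissibility of the next level, one generation deeper
        intro u hu
        simp only [List.mem_flatMap] at hu
        obtain ⟨t, ht, hu⟩ := hu
        obtain ⟨a, b, c⟩ := t
        have hadm := (hlev _ ht).1
        have hfuel := (hlev _ ht).2
        simp only [pvInv, pvSum] at hadm hfuel
        by_cases hgt : a + b + c > P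
        · simp [pvChildren, hgt] at hu
        · have hI : 0 ≤ a ∧ a ≤ b ∧ b ≤ c ∧ 1 ≤ c := by tauto
          simp only [pvChildren, if_neg hgt, List.mem_append, List.mem_singleton] at hu
          rcases hu with (rfl | hu) | hu
          · exact ⟨Or.inl (by simp only [pvInv]; omega), by simp only [pvSum]; omega⟩
          · by_cases h2 : a > 0
            · simp only [if_pos h2, List.mem_singleton] at hu
              subst hu
              exact ⟨Or.inl (by simp only [pvInv]; omega), by simp only [pvSum]; omega⟩
            · simp [h2] at hu
          · by_cases h3 : (a = 0 ∧ 0 < b ∧ b < c) ∨ (a > 0 ∧ b > a)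
            · simp only [if_pos h3, List.mem_singleton] at hu
              subst hu
              exact ⟨Or.inl (by simp only [pvInv]; omega), by simp only [pvSum]; omega⟩
            · simp [h3] at hu

-- ===== VERDICT (by name: the statement is the Claim_ definition above) =====
theorem nsols_spec : Claim_equal_nsols := by
  intro a b c P _ hpre
  unfold Spec_nsols nsols_alt
  rw [pvLevel_eq]
  · simp [pvVal, nsols]
  · intro t ht
    simp only [List.mem_singleton] at ht
    subst ht
    unfold Pre_nsols at hpre
    simp only [pvInv, pvSum]
    exact ⟨by tauto, by omega⟩
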